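-- pv_equiv track=rewrite | github.com/kokter/TProgramming_2024 | codewars/Anagram difference/2.py | anagram_difference
-- ===== SOURCE A (Python) =====
-- from collections import Counter
--
-- def anagram_difference(w1, w2):
--     count1 = Counter(w1)
--     count2 = Counter(w2)
--
--     difference = 0
--
--     all_letters = set(count1.keys()).union(set(count2.keys()))
--
--     for letter in all_letters:
--         difference += abs(count1[letter] - count2[letter])
--
--     return difference
-- ===== SOURCE B (Python) =====
-- def anagram_difference(w1, w2):
--     remaining = {}
--     for ch in w1:
--         remaining[ch] = remaining.get(ch, 0) + 1
--     matched = 0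
--     for ch in w2:
--         if remaining.get(ch, 0) > 0:
--             remaining[ch] -= 1
--             matched += 1
--     return len(w1) + len(w2) - 2 * matched
-- ===== Notes on version B (the rewrite author's own statement) =====
-- stated objective: alternative
-- what changed: Replaces the two Counters plus a loop over the union of their key sets summing per-letter absolute differences by a single greedy pass over w2 that consumes matching letters from a count map of w1, returning len(w1)+len(w2)-2*matched.
import Mathlib
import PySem

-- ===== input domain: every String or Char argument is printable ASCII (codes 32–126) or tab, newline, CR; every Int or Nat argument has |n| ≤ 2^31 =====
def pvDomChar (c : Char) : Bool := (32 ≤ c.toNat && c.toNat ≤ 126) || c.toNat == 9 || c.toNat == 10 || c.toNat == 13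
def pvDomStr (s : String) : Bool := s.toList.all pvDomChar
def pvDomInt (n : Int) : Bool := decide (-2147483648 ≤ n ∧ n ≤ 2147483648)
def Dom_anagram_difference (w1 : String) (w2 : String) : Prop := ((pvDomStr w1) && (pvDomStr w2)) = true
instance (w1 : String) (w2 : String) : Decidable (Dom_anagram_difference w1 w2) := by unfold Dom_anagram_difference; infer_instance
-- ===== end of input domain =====

-- B replaces A's two Counters and union-of-keys |c1-c2| sum by one greedy pass over w2
-- consuming letters from a count map of w1 (alternative decomposition, same cost).

-- ===== PORT A =====
def anagram_difference (w1 : String) (w2 : String) : Int :=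
  let count1 := PySem.Dict.counter w1.toList
  let count2 := PySem.Dict.counter w2.toList
  -- iteration over the set only sums, so the result is order-independent
  let all_letters := PySem.Set.union (PySem.Set.ofList count1.keys) (PySem.Set.ofList count2.keys)
  all_letters.foldl (fun difference letter => difference + |count1.getD letter 0 - count2.getD letter 0|) 0

-- ===== PORT B =====
-- the body of B's second loop
def pvBStep (p : PySem.Dict Char Int × Int) (ch : Char) : PySem.Dict Char Int × Int :=
  if p.1.getD ch 0 > 0 then (p.1.insert ch (p.1.getD ch 0 - 1), p.2 + 1) else p

def anagram_difference_alt (w1 : String) (w2 : String) : Int :=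
  let remaining := w1.toList.foldl (fun d ch => d.insert ch (d.getD ch 0 + 1)) PySem.Dict.empty
  let st := w2.toList.foldl pvBStep (remaining, 0)
  (w1.toList.length : Int) + (w2.toList.length : Int) - 2 * st.2

-- ===== PRECONDITION & SPEC =====
def Spec_anagram_difference (w1 : String) (w2 : String) (out : Int) : Prop := out = anagram_difference_alt w1 w2
instance (w1 : String) (w2 : String) (out : Int) : Decidable (Spec_anagram_difference w1 w2 out) := by unfold Spec_anagram_difference; infer_instance

-- ===== CLAIM (what is proved, stated in full; the proofs are below) =====
def Claim_equal_anagram_difference : Prop := ∀ (w1 : String) (w2 : String), Dom_anagram_difference w1 w2 → Spec_anagram_difference w1 w2 (anagram_difference w1 w2)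

-- ===== LEMMAS AND PROOFS =====

-- A's fold over the union set, as a Finset sum over the characters of both words
lemma pvA_eq_sum (w1 w2 : String) :
    anagram_difference w1 w2 =
      ∑ c ∈ (w1.toList ++ w2.toList).toFinset,
        |(w1.toList.count c : Int) - (w2.toList.count c : Int)| := by
  unfold anagram_difference
  rw [PySem.List.foldl_add]
  have hU : (PySem.Set.union (PySem.Set.ofList (PySem.Dict.counter w1.toList).keys)
      (PySem.Set.ofList (PySem.Dict.counter w2.toList).keys)).toFinset
      = (w1.toList ++ w2.toList).toFinset := by
    ext c
    simp [PySem.Dict.keys_counter, PySem.Set.ofList_ofList, PySem.Set.mem_union,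
      PySem.Set.mem_ofList]
  have hnd : (PySem.Set.union (PySem.Set.ofList (PySem.Dict.counter w1.toList).keys)
      (PySem.Set.ofList (PySem.Dict.counter w2.toList).keys)).Nodup :=
    PySem.Set.nodup_union _ _ (PySem.Set.nodup_ofList _)
  rw [← List.sum_toFinset _ hnd, hU]
  simp [PySem.Dict.getD_counter]

-- B's greedy loop counts, per character, the shared minimum of availability and demand
lemma pvB_loop (l : List Char) (d : PySem.Dict Char Int) (m : Int) (s : Finset Char)
    (hs : ∀ c ∈ l, c ∈ s) :
    (l.foldl pvBStep (d, m)).2 =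
      m + ∑ c ∈ s, min (max (d.getD c 0) 0) (l.count c : Int) := by
  induction l generalizing d m with
  | nil => simp
  | cons ch t ih =>
    have hch : ch ∈ s := hs ch (List.mem_cons_self ..)
    have hst : ∀ c ∈ t, c ∈ s := fun c hc => hs c (List.mem_cons_of_mem _ hc)
    by_cases hpos : d.getD ch 0 > 0
    · have hstep : pvBStep (d, m) ch = (d.insert ch (d.getD ch 0 - 1), m + 1) := by
        simp [pvBStep, hpos]
      rw [List.foldl_cons, hstep, ih _ _ hst]
      rw [← Finset.add_sum_erase _ _ hch, ← Finset.add_sum_erase _ _ hch]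
      have htail : ∑ c ∈ s.erase ch, min (max ((d.insert ch (d.getD ch 0 - 1)).getD c 0) 0) (t.count c : Int)
          = ∑ c ∈ s.erase ch, min (max (d.getD c 0) 0) ((ch :: t).count c : Int) := by
        refine Finset.sum_congr rfl (fun c hc => ?_)
        have hne : c ≠ ch := Finset.ne_of_mem_erase hc
        rw [PySem.Dict.getD_insert, if_neg hne]
        simp [Ne.symm hne]
      rw [htail, PySem.Dict.getD_insert, if_pos rfl]
      simp only [List.count_cons, beq_self_eq_true, if_true]
      push_cast
      omega
    · have hstep : pvBStep (d, m) ch = (d, m) := by simp [pvBStep, hpos]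
      rw [List.foldl_cons, hstep, ih _ _ hst]
      congr 1
      rw [← Finset.add_sum_erase _ _ hch, ← Finset.add_sum_erase _ _ hch]
      have htail : ∑ c ∈ s.erase ch, min (max (d.getD c 0) 0) (t.count c : Int)
          = ∑ c ∈ s.erase ch, min (max (d.getD c 0) 0) ((ch :: t).count c : Int) := by
        refine Finset.sum_congr rfl (fun c hc => ?_)
        have hne : c ≠ ch := Finset.ne_of_mem_erase hc
        simp [Ne.symm hne]
      rw [htail]
      simp only [List.count_cons, beq_self_eq_true, if_true]
      push_cast
      omega

lemma pvB_eq_sum (w1 w2 : String) :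
    anagram_difference_alt w1 w2 =
      (w1.toList.length : Int) + (w2.toList.length : Int) -
        2 * ∑ c ∈ (w1.toList ++ w2.toList).toFinset,
              min (w1.toList.count c : Int) (w2.toList.count c : Int) := by
  have hrem : w1.toList.foldl (fun d ch => d.insert ch (d.getD ch 0 + 1)) PySem.Dict.empty
      = PySem.Dict.counter w1.toList := PySem.Dict.foldl_insert_getD_add_one_eq_counter w1.toList
  simp only [anagram_difference_alt, hrem]
  rw [pvB_loop w2.toList (PySem.Dict.counter w1.toList) 0 ((w1.toList ++ w2.toList).toFinset)
    (fun c hc => List.mem_toFinset.mpr (List.mem_append.mpr (Or.inr hc)))]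
  have hsum : ∑ c ∈ (w1.toList ++ w2.toList).toFinset,
        min (max ((PySem.Dict.counter w1.toList).getD c 0) 0) (w2.toList.count c : Int)
      = ∑ c ∈ (w1.toList ++ w2.toList).toFinset,
        min (w1.toList.count c : Int) (w2.toList.count c : Int) :=
    Finset.sum_congr rfl (fun c _ => by rw [PySem.Dict.getD_counter]; omega)
  rw [hsum]
  ring

-- a list's length is the sum of its counts over any finite superset of its elements
lemma pvLen_eq_sum (l : List Char) (s : Finset Char) (hs : ∀ c ∈ l, c ∈ s) :
    (l.length : Int) = ∑ c ∈ s, (l.count c : Int) := by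
  have h1 : l.toFinset ⊆ s := fun c hc => hs c (List.mem_toFinset.mp hc)
  calc (l.length : Int) = ((∑ c ∈ l.toFinset, l.count c : Nat) : Int) := by
        rw [List.sum_toFinset_count_eq_length]
    _ = ∑ c ∈ l.toFinset, (l.count c : Int) := by push_cast; rfl
    _ = ∑ c ∈ s, (l.count c : Int) := Finset.sum_subset h1 (fun c _ hc => by
        simp [List.count_eq_zero_of_not_mem (fun h => hc (List.mem_toFinset.mpr h))])

-- ===== VERDICT (by name: the statement is the Claim_ definition above) =====
theorem anagram_difference_spec : Claim_equal_anagram_difference := by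
  intro w1 w2 _
  unfold Spec_anagram_difference
  rw [pvA_eq_sum, pvB_eq_sum,
    pvLen_eq_sum w1.toList _ (fun c hc => List.mem_toFinset.mpr (List.mem_append.mpr (Or.inl hc))),
    pvLen_eq_sum w2.toList _ (fun c hc => List.mem_toFinset.mpr (List.mem_append.mpr (Or.inr hc))),
    ← Finset.sum_add_distrib, Finset.mul_sum, ← Finset.sum_sub_distrib]
  refine Finset.sum_congr rfl (fun c _ => ?_)
  rcases le_total ((w1.toList.count c : Int)) ((w2.toList.count c : Int)) with h | h
  · rw [abs_of_nonpos (by omega), min_eq_left h]; ring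
  · rw [abs_of_nonneg (by omega), min_eq_right h]; ring
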